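-- pv_equiv track=rewrite | github.com/Winters0727/BOJ | 일반/2578.py | bingo_checker
-- ===== SOURCE A (Python) =====
-- def bingo_checker(bingo):
--     cnt = 0
--     for row in bingo: # 가로 체크
--         if row == [0,0,0,0,0]:
--             cnt += 1
--     for col in range(5): # 세로 체크
--         temp = []
--         for row in range(5):
--             temp += [bingo[row][col]]
--         if temp == [0,0,0,0,0]:
--             cnt += 1
--     temp1, temp2 = [], []
--     for idx in range(5): # 대각  체크
--         temp1 += [bingo[idx][idx]]
--         temp2 += [bingo[4-idx][idx]]
--     if temp1 == [0,0,0,0,0]: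
--         cnt += 1
--     if temp2 == [0,0,0,0,0]:
--         cnt += 1
--     return cnt
-- ===== SOURCE B (Python) =====
-- def bingo_checker(bingo):
--     # count zeros per line with integer counters instead of building lines and
--     # comparing them to [0,0,0,0,0]; a line is bingo iff its zero-count is 5
--     cnt = 0
--     for row in bingo:
--         cnt += row == [0, 0, 0, 0, 0]
--     col_zeros = [0, 0, 0, 0, 0]
--     d1 = d2 = 0
--     for r in range(5):
--         for c in range(5):
--             z = bingo[r][c] == 0
--             col_zeros[c] += z
--             if r == c:
--                 d1 += z
--             if r + c == 4:
--                 d2 += z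
--     for n in col_zeros:
--         cnt += n == 5
--     cnt += d1 == 5
--     cnt += d2 == 5
--     return cnt
-- ===== Notes on version B (the rewrite author's own statement) =====
-- stated objective: alternative
-- what changed: Instead of materialising each column/diagonal as a temp list and comparing it to [0,0,0,0,0], B keeps integer zero-counters (one per column plus two diagonal counters) filled in a single cell sweep and counts a line as bingo when its zero-count reaches 5.
import Mathlib
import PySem

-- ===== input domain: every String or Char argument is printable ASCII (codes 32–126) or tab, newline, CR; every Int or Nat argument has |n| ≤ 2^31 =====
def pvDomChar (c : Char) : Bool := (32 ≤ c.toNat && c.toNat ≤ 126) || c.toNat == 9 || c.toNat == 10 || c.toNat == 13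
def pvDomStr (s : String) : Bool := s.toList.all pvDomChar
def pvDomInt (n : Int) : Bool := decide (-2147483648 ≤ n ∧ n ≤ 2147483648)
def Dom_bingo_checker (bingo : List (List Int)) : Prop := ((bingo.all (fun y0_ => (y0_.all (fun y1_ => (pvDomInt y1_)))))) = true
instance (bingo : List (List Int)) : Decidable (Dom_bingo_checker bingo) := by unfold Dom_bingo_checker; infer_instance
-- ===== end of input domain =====

-- B replaces A's build-a-line-then-compare-lists scheme by per-line zero COUNTERS
-- filled in one cell sweep: a line is bingo iff its zero-count reaches 5 (alternative
-- decomposition; same cost).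


-- ===== PORT A =====
-- literal port of A; bingo[row][col] is pyGetD (pyGetD …), exact under Pre_ (indices in range)
def bingo_checker (bingo : List (List Int)) : Int :=
  let cnt : Int := bingo.foldl (fun cnt row => if row = [0,0,0,0,0] then cnt + 1 else cnt) 0
  let cnt : Int := (PySem.List.pyRange 0 5 1).foldl (fun cnt col =>
    let temp : List Int := (PySem.List.pyRange 0 5 1).foldl
      (fun temp row => temp ++ [PySem.List.pyGetD (PySem.List.pyGetD bingo row []) col 0]) []
    if temp = [0,0,0,0,0] then cnt + 1 else cnt) cnt
  let p : List Int × List Int := (PySem.List.pyRange 0 5 1).foldl (fun p idx =>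
    (p.1 ++ [PySem.List.pyGetD (PySem.List.pyGetD bingo idx []) idx 0],
     p.2 ++ [PySem.List.pyGetD (PySem.List.pyGetD bingo (4 - idx) []) idx 0])) ([], [])
  let cnt : Int := if p.1 = [0,0,0,0,0] then cnt + 1 else cnt
  if p.2 = [0,0,0,0,0] then cnt + 1 else cnt

-- ===== PORT B =====
-- the body of Source B's inner cell loop, named so the proofs can evaluate it row by row;
-- 'col_zeros[c] += z' is List.set at c.toNat — exact, c ∈ range(5) is ≥ 0
def pvCell (g : Int → Int → Int) (r : Int) (st : List Int × Int × Int) (c : Int) :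
    List Int × Int × Int :=
  let z : Int := if g r c = 0 then 1 else 0
  (st.1.set c.toNat (st.1.getD c.toNat 0 + z),
   (if r = c then st.2.1 + z else st.2.1),
   (if r + c = 4 then st.2.2 + z else st.2.2))

-- literal port of Source B; 'cnt += <bool>' is cnt + (if … then 1 else 0) (Python bools are 0/1 ints)
def bingo_checker_alt (bingo : List (List Int)) : Int :=
  let g : Int → Int → Int := fun r c => PySem.List.pyGetD (PySem.List.pyGetD bingo r []) c 0
  let cnt : Int := bingo.foldl (fun cnt row => cnt + (if row = [0,0,0,0,0] then 1 else 0)) 0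
  let st : List Int × Int × Int := (PySem.List.pyRange 0 5 1).foldl (fun st r =>
    (PySem.List.pyRange 0 5 1).foldl (pvCell g r) st) ([0,0,0,0,0], 0, 0)
  let cnt : Int := st.1.foldl (fun cnt n => cnt + (if n = 5 then 1 else 0)) cnt
  let cnt : Int := cnt + (if st.2.1 = 5 then 1 else 0)
  cnt + (if st.2.2 = 5 then 1 else 0)

-- ===== PRECONDITION & SPEC =====
-- Pre_ excludes exactly the inputs where Python A raises IndexError: fewer than 5 rows,
-- or one of the first 5 rows shorter than 5.
def Pre_bingo_checker (bingo : List (List Int)) : Prop :=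
  5 ≤ bingo.length ∧ ∀ row ∈ bingo.take 5, 5 ≤ row.length
instance (bingo : List (List Int)) : Decidable (Pre_bingo_checker bingo) := by
  unfold Pre_bingo_checker; infer_instance
def pvWitness_bingo_checker : List (List Int) :=
  [[0,0,0,0,0],[1,0,0,0,0],[0,0,1,0,0],[0,0,0,1,0],[0,0,0,0,1]]

def Spec_bingo_checker (bingo : List (List Int)) (out : Int) : Prop := out = bingo_checker_alt bingo
instance (bingo : List (List Int)) (out : Int) : Decidable (Spec_bingo_checker bingo out) := by unfold Spec_bingo_checker; infer_instance

-- ===== CLAIM (what is proved, stated in full; the proofs are below) =====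
def Claim_equal_bingo_checker : Prop := ∀ (bingo : List (List Int)), Dom_bingo_checker bingo → Pre_bingo_checker bingo → Spec_bingo_checker bingo (bingo_checker bingo)

-- ===== LEMMAS AND PROOFS =====
theorem pyRange05 : PySem.List.pyRange 0 5 1 = [0,1,2,3,4] := by decide

theorem toNat2 : (2:Int).toNat = 2 := rfl
theorem toNat3 : (3:Int).toNat = 3 := rfl
theorem toNat4 : (4:Int).toNat = 4 := rfl

theorem ite_push (P : Prop) [Decidable P] (k z : Int) :
    (if P then k + z else k) = k + (if P then z else 0) := by split_ifs <;> ring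

-- evaluating one cell of B's sweep at column 0
theorem pvCell0 (g : Int → Int → Int) (r x0 x1 x2 x3 x4 d1 d2 : Int) :
    pvCell g r ([x0,x1,x2,x3,x4], d1, d2) 0 =
    ([x0 + (if g r 0 = 0 then 1 else 0),x1,x2,x3,x4],
     d1 + (if r = 0 then (if g r 0 = 0 then 1 else 0) else 0),
     d2 + (if r + 0 = 4 then (if g r 0 = 0 then 1 else 0) else 0)) := by
  simp only [pvCell]
  norm_num [List.set, List.getD, ite_push, toNat2, toNat3, toNat4]

-- evaluating one cell of B's sweep at column 1
theorem pvCell1 (g : Int → Int → Int) (r x0 x1 x2 x3 x4 d1 d2 : Int) :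
    pvCell g r ([x0,x1,x2,x3,x4], d1, d2) 1 =
    ([x0,x1 + (if g r 1 = 0 then 1 else 0),x2,x3,x4],
     d1 + (if r = 1 then (if g r 1 = 0 then 1 else 0) else 0),
     d2 + (if r + 1 = 4 then (if g r 1 = 0 then 1 else 0) else 0)) := by
  simp only [pvCell]
  norm_num [List.set, List.getD, ite_push, toNat2, toNat3, toNat4]

-- evaluating one cell of B's sweep at column 2
theorem pvCell2 (g : Int → Int → Int) (r x0 x1 x2 x3 x4 d1 d2 : Int) :
    pvCell g r ([x0,x1,x2,x3,x4], d1, d2) 2 =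
    ([x0,x1,x2 + (if g r 2 = 0 then 1 else 0),x3,x4],
     d1 + (if r = 2 then (if g r 2 = 0 then 1 else 0) else 0),
     d2 + (if r + 2 = 4 then (if g r 2 = 0 then 1 else 0) else 0)) := by
  simp only [pvCell]
  norm_num [List.set, List.getD, ite_push, toNat2, toNat3, toNat4]

-- evaluating one cell of B's sweep at column 3
theorem pvCell3 (g : Int → Int → Int) (r x0 x1 x2 x3 x4 d1 d2 : Int) :
    pvCell g r ([x0,x1,x2,x3,x4], d1, d2) 3 =
    ([x0,x1,x2,x3 + (if g r 3 = 0 then 1 else 0),x4],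
     d1 + (if r = 3 then (if g r 3 = 0 then 1 else 0) else 0),
     d2 + (if r + 3 = 4 then (if g r 3 = 0 then 1 else 0) else 0)) := by
  simp only [pvCell]
  norm_num [List.set, List.getD, ite_push, toNat2, toNat3, toNat4]

-- evaluating one cell of B's sweep at column 4
theorem pvCell4 (g : Int → Int → Int) (r x0 x1 x2 x3 x4 d1 d2 : Int) :
    pvCell g r ([x0,x1,x2,x3,x4], d1, d2) 4 =
    ([x0,x1,x2,x3,x4 + (if g r 4 = 0 then 1 else 0)],
     d1 + (if r = 4 then (if g r 4 = 0 then 1 else 0) else 0),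
     d2 + (if r + 4 = 4 then (if g r 4 = 0 then 1 else 0) else 0)) := by
  simp only [pvCell]
  norm_num [List.set, List.getD, ite_push, toNat2, toNat3, toNat4]

-- a 5-list equals all-zeros iff its zero-count is 5
theorem line_count (a b c d e : Int) :
    (if [a,b,c,d,e] = ([0,0,0,0,0] : List Int) then (1:Int) else 0) =
    (if (if a = 0 then (1:Int) else 0) + (if b = 0 then (1:Int) else 0) +
        (if c = 0 then (1:Int) else 0) + (if d = 0 then (1:Int) else 0) +
        (if e = 0 then (1:Int) else 0) = 5 then (1:Int) else 0) := by
  simp only [List.cons.injEq, and_true]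
  split_ifs <;> omega

-- ===== VERDICT (by name: the statement is the Claim_ definition above) =====
set_option maxHeartbeats 1000000 in
theorem bingo_checker_spec : Claim_equal_bingo_checker := by
  intro bingo _ _
  unfold Spec_bingo_checker bingo_checker bingo_checker_alt
  simp only [pyRange05, List.foldl, pvCell0, pvCell1, pvCell2, pvCell3, pvCell4,
    List.cons_append, List.nil_append, Int.reduceAdd, Int.reduceSub, Int.reduceEq, reduceIte,
    zero_add, add_zero, ite_push, line_count]
  ring_nf
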